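-- pv_equiv track=rewrite | github.com/Ag3497120/verantyx-v6 | synth_results/00d62c1b.py | transform
-- ===== SOURCE A (Python) =====
-- def transform(grid):
--     import copy
--     result = copy.deepcopy(grid)
--     height = len(grid)
--     width = len(grid[0])
--
--     # Find all positions with value 4
--     fours = []
--     for r in range(height):
--         for c in range(width):
--             if grid[r][c] == 4:
--                 fours.append((r, c))
--
--     # For each 4, convert adjacent 5s to 2s
--     for r, c in fours:
--         # Check all 4-connected neighbors
--         for dr, dc in [(-1, 0), (1, 0), (0, -1), (0, 1)]:
--             nr, nc = r + dr, c + dc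
--             if 0 <= nr < height and 0 <= nc < width:
--                 if result[nr][nc] == 5:
--                     result[nr][nc] = 2
--
--     return result
-- ===== SOURCE B (Python) =====
-- # B: single gather pass — copy the grid, then for each cell in the height x width
-- # scan turn a 5 into 2 iff one of its in-bounds orthogonal neighbors is a 4
-- # (4s are never changed, so reading the input grid for neighbors is exact).
-- def transform(grid):
--     height = len(grid)
--     width = len(grid[0])
--     result = [row[:] for row in grid]
--     for r in range(height):
--         for c in range(width):
--             if result[r][c] == 5 and any(
--                 0 <= nr < height and 0 <= nc < width and grid[nr][nc] == 4
--                 for nr, nc in ((r - 1, c), (r + 1, c), (r, c - 1), (r, c + 1))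
--             ):
--                 result[r][c] = 2
--     return result
-- ===== Notes on version B (the rewrite author's own statement) =====
-- stated objective: simpler
-- what changed: Replaces A's two-phase scatter (collect all 4-cells into a list, then mutate each 5-neighbor of each collected 4) with a single gather pass over the grid that turns each 5 into 2 iff one of its four in-bounds orthogonal neighbors is a 4.
import Mathlib
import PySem

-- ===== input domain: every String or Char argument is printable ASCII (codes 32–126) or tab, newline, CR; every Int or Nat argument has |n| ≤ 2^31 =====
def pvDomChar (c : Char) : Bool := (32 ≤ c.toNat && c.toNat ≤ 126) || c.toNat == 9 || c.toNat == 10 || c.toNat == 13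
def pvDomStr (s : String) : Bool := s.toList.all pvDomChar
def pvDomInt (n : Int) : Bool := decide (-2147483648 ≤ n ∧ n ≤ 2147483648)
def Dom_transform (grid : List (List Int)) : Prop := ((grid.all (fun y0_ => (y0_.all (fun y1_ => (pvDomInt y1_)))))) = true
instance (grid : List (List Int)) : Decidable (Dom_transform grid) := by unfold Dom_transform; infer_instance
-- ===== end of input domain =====

-- B is a single functional gather pass (each 5 looks at its neighbors for a 4) instead of
-- A's collect-the-4s-then-scatter-2s mutation; same cost, simpler shape (objective: simpler).

-- ===== PORT A =====
-- grid[0] is ported as grid.headD [] and grid[r][c] via pyGetD: exact on Pre_ (rectangular,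
-- nonempty grids), where every index A uses is in range.
def transform (grid : List (List Int)) : List (List Int) :=
  let height : Int := grid.length
  let width : Int := (grid.headD []).length
  let fours : List (Int × Int) :=
    (PySem.List.pyRange 0 height 1).foldl (fun acc r =>
      (PySem.List.pyRange 0 width 1).foldl (fun acc c =>
        if PySem.List.pyGetD (PySem.List.pyGetD grid r []) c 0 = 4 then acc ++ [(r, c)]
        else acc) acc) []
  fours.foldl (fun result rc =>
    [((-1 : Int), (0 : Int)), (1, 0), (0, -1), (0, 1)].foldl (fun result d =>
      let nr := rc.1 + d.1
      let nc := rc.2 + d.2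
      if 0 ≤ nr ∧ nr < height ∧ 0 ≤ nc ∧ nc < width then
        if PySem.List.pyGetD (PySem.List.pyGetD result nr []) nc 0 = 5 then
          PySem.List.pySetD result nr (PySem.List.pySetD (PySem.List.pyGetD result nr []) nc 2)
        else result
      else result) result) grid

-- ===== PORT B =====
-- any(...) over the four neighbor coordinates
def altHas4 (grid : List (List Int)) (height width r c : Int) : Bool :=
  [(r - 1, c), (r + 1, c), (r, c - 1), (r, c + 1)].any (fun n =>
    decide (0 ≤ n.1 ∧ n.1 < height ∧ 0 ≤ n.2 ∧ n.2 < width) &&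
    (PySem.List.pyGetD (PySem.List.pyGetD grid n.1 []) n.2 0 == 4))

-- result = [row[:] for row in grid] is the identity on immutable Lean lists
def transform_alt (grid : List (List Int)) : List (List Int) :=
  let height : Int := grid.length
  let width : Int := (grid.headD []).length
  (PySem.List.pyRange 0 height 1).foldl (fun result r =>
    (PySem.List.pyRange 0 width 1).foldl (fun result c =>
      if PySem.List.pyGetD (PySem.List.pyGetD result r []) c 0 = 5 ∧
          altHas4 grid height width r c = true then
        PySem.List.pySetD result r (PySem.List.pySetD (PySem.List.pyGetD result r []) c 2)
      else result) result) grid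

-- ===== PRECONDITION & SPEC =====
-- Exactly where the Python A returns: A raises IndexError on the empty grid (len(grid[0])) and whenever
-- some row is shorter than len(grid[0]) (its scan indexes every row up to that width).
def Pre_transform (grid : List (List Int)) : Prop :=
  grid ≠ [] ∧ ∀ row ∈ grid, (grid.headD []).length ≤ row.length
instance (grid : List (List Int)) : Decidable (Pre_transform grid) := by
  unfold Pre_transform; infer_instance

def pvWitness_transform : List (List Int) := [[5, 4], [0, 5]]

def Spec_transform (grid : List (List Int)) (out : List (List Int)) : Prop := out = transform_alt grid
instance (grid : List (List Int)) (out : List (List Int)) : Decidable (Spec_transform grid out) := by unfold Spec_transform; infer_instance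

-- ===== CLAIM (what is proved, stated in full; the proofs are below) =====
def Claim_equal_transform : Prop := ∀ (grid : List (List Int)), Dom_transform grid → Pre_transform grid → Spec_transform grid (transform grid)

-- ===== LEMMAS AND PROOFS =====

theorem pv_pyGetD_nonneg {α : Type} (xs : List α) (i : Int) (d : α) (h : 0 ≤ i) :
    PySem.List.pyGetD xs i d = xs.getD i.toNat d := by
  simp [PySem.List.pyGetD, PySem.List.pyGet?_of_nonneg (h := h), List.getD]

theorem pv_getD_set {α : Type} (xs : List α) (n m : Nat) (v d : α) :
    (xs.set n v).getD m d = if m = n ∧ n < xs.length then v else xs.getD m d := by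
  simp only [List.getD, List.getElem?_set]
  split_ifs with h1 h2 h3 <;> simp_all

theorem pv_foldl_flatMap {α β σ : Type} (l : List α) (g : α → List β) (f : σ → β → σ) (init : σ) :
    (l.flatMap g).foldl f init = l.foldl (fun s a => (g a).foldl f s) init := by
  induction l generalizing init with
  | nil => rfl
  | cons x xs ih => simp [List.foldl_append, ih]

theorem pv_mem_foldl_append_if {β γ : Type} (l : List β) (p : β → Prop) [DecidablePred p]
    (f : β → γ) (acc : List γ) (x : γ) :
    (x ∈ l.foldl (fun a c => if p c then a ++ [f c] else a) acc) ↔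
      x ∈ acc ∨ ∃ c ∈ l, p c ∧ x = f c := by
  induction l generalizing acc with
  | nil => simp
  | cons y ys ih =>
    simp only [List.foldl_cons, ih, List.mem_cons]
    split_ifs with h <;> simp_all <;> tauto

def pvG (R : List (List Int)) (i j : Nat) : Int := (R.getD i []).getD j 0

def pvStep (H W : Int) (R : List (List Int)) (q : Int × Int) : List (List Int) :=
  if 0 ≤ q.1 ∧ q.1 < H ∧ 0 ≤ q.2 ∧ q.2 < W then
    if PySem.List.pyGetD (PySem.List.pyGetD R q.1 []) q.2 0 = 5 then
      PySem.List.pySetD R q.1 (PySem.List.pySetD (PySem.List.pyGetD R q.1 []) q.2 2)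
    else R
  else R

abbrev pvInb (H W : Int) (q : Int × Int) : Prop := 0 ≤ q.1 ∧ q.1 < H ∧ 0 ≤ q.2 ∧ q.2 < W

theorem pvStep_len (H W : Int) (R : List (List Int)) (q : Int × Int) :
    (pvStep H W R q).length = R.length := by
  unfold pvStep
  split_ifs with h1 h2
  · simp [PySem.List.pySetD_of_nonneg (h := h1.1)]
  · rfl
  · rfl

theorem pvStep_rowlen (H W : Int) (R : List (List Int)) (q : Int × Int) (i : Nat) :
    ((pvStep H W R q).getD i []).length = (R.getD i []).length := by
  unfold pvStep
  split_ifs with h1 h2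
  · rw [PySem.List.pySetD_of_nonneg (h := h1.1), pv_pyGetD_nonneg _ _ _ h1.1,
        PySem.List.pySetD_of_nonneg (h := h1.2.2.1), pv_getD_set]
    split_ifs with h3
    · rw [h3.1]
      simp
    · rfl
  · rfl
  · rfl

theorem pvStep_G (H W : Int) (R : List (List Int)) (q : Int × Int) (i j : Nat) :
    pvG (pvStep H W R q) i j =
      if pvG R i j = 5 ∧ pvInb H W q ∧ q = ((i : Int), (j : Int)) then 2 else pvG R i j := by
  unfold pvStep pvG pvInb
  split_ifs with h1 h2 h3 h4 h5
  all_goals try rfl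
  · -- set happened, condition true: q = (i,j)
    obtain ⟨h51, h52⟩ := h3.2
    rw [PySem.List.pySetD_of_nonneg (h := h1.1), pv_pyGetD_nonneg _ _ _ h1.1,
        PySem.List.pySetD_of_nonneg (h := h1.2.2.1), pv_getD_set]
    rw [pv_pyGetD_nonneg _ _ _ h1.1, pv_pyGetD_nonneg _ _ _ h1.2.2.1] at h2
    have hq1 : q.1.toNat = i := by have := congrArg Prod.fst h52; simp at this; omega
    have hq2 : q.2.toNat = j := by have := congrArg Prod.snd h52; simp at this; omega
    have hlt1 : q.1.toNat < R.length := by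
      by_contra hc
      rw [show R.getD q.1.toNat [] = [] from List.getD_eq_default _ _ (by omega)] at h2
      simp at h2
    have hlt2 : q.2.toNat < (R.getD q.1.toNat []).length := by
      by_contra hc
      rw [List.getD_eq_default _ _ (by omega)] at h2
      exact absurd h2 (by norm_num)
    rw [if_pos ⟨hq1.symm, hlt1⟩, pv_getD_set, if_pos ⟨hq2.symm, hlt2⟩]
  · -- set happened, condition false: q ≠ (i,j) or R cell ≠ 5
    rw [PySem.List.pySetD_of_nonneg (h := h1.1), pv_pyGetD_nonneg _ _ _ h1.1,
        PySem.List.pySetD_of_nonneg (h := h1.2.2.1), pv_getD_set]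
    rw [pv_pyGetD_nonneg _ _ _ h1.1, pv_pyGetD_nonneg _ _ _ h1.2.2.1] at h2
    split_ifs with h5
    · rw [pv_getD_set]
      split_ifs with h6
      · exfalso
        apply h3
        refine ⟨?_, h1, ?_⟩
        · rw [← h5.1, ← h6.1] at h2; exact h2
        · ext <;> simp <;> omega
      · rw [h5.1]
    · rfl
  · -- condition true but inner 5-check failed: impossible
    exfalso
    obtain ⟨h41, ⟨_, h43⟩⟩ := h4
    apply h2
    rw [pv_pyGetD_nonneg _ _ _ h1.1, pv_pyGetD_nonneg _ _ _ h1.2.2.1, h43]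
    simpa using h41
  · -- out of bounds, condition claims inb: contradiction
    exfalso
    exact h1 h5.2.1

abbrev pvHit (H W : Int) (Q : List (Int × Int)) (i j : Nat) : Prop :=
  ∃ q ∈ Q, pvInb H W q ∧ q = ((i : Int), (j : Int))

theorem pvFold_inv (grid : List (List Int)) (H W : Int) (L : List (Int × Int)) :
    ∀ (Q : List (Int × Int)) (R : List (List Int)),
      R.length = grid.length →
      (∀ i, (R.getD i []).length = (grid.getD i []).length) →
      (∀ i j, pvG R i j = if pvG grid i j = 5 ∧ pvHit H W Q i j then 2 else pvG grid i j) →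
      (L.foldl (pvStep H W) R).length = grid.length ∧
      (∀ i, ((L.foldl (pvStep H W) R).getD i []).length = (grid.getD i []).length) ∧
      (∀ i j, pvG (L.foldl (pvStep H W) R) i j =
        if pvG grid i j = 5 ∧ pvHit H W (Q ++ L) i j then 2 else pvG grid i j) := by
  induction L with
  | nil =>
    intro Q R h1 h2 h3
    simp only [List.foldl_nil, List.append_nil]
    exact ⟨h1, h2, h3⟩
  | cons q L ih =>
    intro Q R h1 h2 h3
    have hstep : ∀ i j, pvG (pvStep H W R q) i j =
        if pvG grid i j = 5 ∧ pvHit H W (Q ++ [q]) i j then 2 else pvG grid i j := by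
      intro i j
      have hq : pvHit H W (Q ++ [q]) i j ↔
          pvHit H W Q i j ∨ (pvInb H W q ∧ q = ((i : Int), (j : Int))) := by
        constructor
        · rintro ⟨p, hp, hinb, heq⟩
          rcases List.mem_append.1 hp with h | h
          · exact Or.inl ⟨p, h, hinb, heq⟩
          · simp at h; subst h; exact Or.inr ⟨hinb, heq⟩
        · rintro (⟨p, hp, hinb, heq⟩ | ⟨hinb, heq⟩)
          · exact ⟨p, List.mem_append.2 (Or.inl hp), hinb, heq⟩
          · exact ⟨q, List.mem_append.2 (Or.inr (by simp)), hinb, heq⟩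
      rw [pvStep_G, h3 i j]
      simp only [hq]
      by_cases hA : pvG grid i j = 5 <;> by_cases hB : pvHit H W Q i j <;>
        by_cases hC : pvInb H W q ∧ q = ((i : Int), (j : Int))
      · have hin : (if pvG grid i j = 5 ∧ pvHit H W Q i j then (2:Int) else pvG grid i j) = 2 :=
          if_pos ⟨hA, hB⟩
        rw [hin, ite_self, if_pos ⟨hA, Or.inl hB⟩]
      · have hin : (if pvG grid i j = 5 ∧ pvHit H W Q i j then (2:Int) else pvG grid i j) = 2 :=
          if_pos ⟨hA, hB⟩
        rw [hin, ite_self, if_pos ⟨hA, Or.inl hB⟩]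
      · have hin : (if pvG grid i j = 5 ∧ pvHit H W Q i j then (2:Int) else pvG grid i j) =
            pvG grid i j := if_neg (fun h => hB h.2)
        rw [hin, if_pos ⟨hA, hC⟩, if_pos ⟨hA, Or.inr hC⟩]
      · have hin : (if pvG grid i j = 5 ∧ pvHit H W Q i j then (2:Int) else pvG grid i j) =
            pvG grid i j := if_neg (fun h => hB h.2)
        rw [hin, if_neg (fun h => hC h.2), if_neg (fun h => h.2.elim hB hC)]
      all_goals
        have hin : (if pvG grid i j = 5 ∧ pvHit H W Q i j then (2:Int) else pvG grid i j) =
            pvG grid i j := if_neg (fun h => hA h.1)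
      all_goals rw [hin, if_neg (fun h => hA h.1), if_neg (fun h => hA h.1)]
    have := ih (Q ++ [q]) (pvStep H W R q) (by rw [pvStep_len]; exact h1)
      (fun i => by rw [pvStep_rowlen]; exact h2 i) hstep
    simpa using this

abbrev pvNb (grid : List (List Int)) (H W a b : Int) : Prop :=
  0 ≤ a ∧ a < H ∧ 0 ≤ b ∧ b < W ∧ PySem.List.pyGetD (PySem.List.pyGetD grid a []) b 0 = 4

theorem pv_mem_foldl2 {p : Int → Int → Prop} [∀ r c, Decidable (p r c)]
    (lr lc : List Int) (x : Int × Int) :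
    ∀ acc : List (Int × Int),
    (x ∈ lr.foldl (fun acc r => lc.foldl
        (fun a c => if p r c then a ++ [(r, c)] else a) acc) acc) ↔
      x ∈ acc ∨ ∃ r ∈ lr, ∃ c ∈ lc, p r c ∧ x = (r, c) := by
  induction lr with
  | nil => simp
  | cons r rs ih =>
    intro acc
    simp only [List.foldl_cons, ih, pv_mem_foldl_append_if lc (p r) (fun c => (r, c)) acc x,
      List.mem_cons]
    constructor
    · rintro ((h | ⟨c, hc, hp, hx⟩) | ⟨r', hr', c, hc, hp, hx⟩)
      · exact Or.inl h
      · exact Or.inr ⟨r, Or.inl rfl, c, hc, hp, hx⟩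
      · exact Or.inr ⟨r', Or.inr hr', c, hc, hp, hx⟩
    · rintro (h | ⟨r', hr | hr', c, hc, hp, hx⟩)
      · exact Or.inl (Or.inl h)
      · subst hr; exact Or.inl (Or.inr ⟨c, hc, hp, hx⟩)
      · exact Or.inr ⟨r', hr', c, hc, hp, hx⟩

theorem pv_mem_fours (grid : List (List Int)) (H W : Int) (x : Int × Int) :
    (x ∈ (PySem.List.pyRange 0 H 1).foldl (fun acc r =>
      (PySem.List.pyRange 0 W 1).foldl (fun acc c =>
        if PySem.List.pyGetD (PySem.List.pyGetD grid r []) c 0 = 4 then acc ++ [(r, c)]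
        else acc) acc) []) ↔ pvNb grid H W x.1 x.2 := by
  rw [pv_mem_foldl2 (p := fun r c => PySem.List.pyGetD (PySem.List.pyGetD grid r []) c 0 = 4)]
  simp only [List.not_mem_nil, false_or, PySem.List.mem_pyRange_one]
  constructor
  · rintro ⟨r, ⟨hr0, hrH⟩, c, ⟨hc0, hcW⟩, hp, hx⟩
    subst hx; exact ⟨hr0, hrH, hc0, hcW, hp⟩
  · rintro ⟨h1, h2, h3, h4, h5⟩
    exact ⟨x.1, ⟨h1, h2⟩, x.2, ⟨h3, h4⟩, h5, rfl⟩

def pvDeltas : List (Int × Int) := [(-1, 0), (1, 0), (0, -1), (0, 1)]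

theorem pv_altHas4_iff (grid : List (List Int)) (H W r c : Int) :
    altHas4 grid H W r c = true ↔
      (pvNb grid H W (r - 1) c ∨ pvNb grid H W (r + 1) c ∨
       pvNb grid H W r (c - 1) ∨ pvNb grid H W r (c + 1)) := by
  simp [altHas4, pvNb, Bool.and_eq_true, beq_iff_eq, and_assoc]

set_option maxHeartbeats 1000000 in
theorem pv_hit_iff (grid : List (List Int)) (H W : Int) (F : List (Int × Int))
    (hF : ∀ x, x ∈ F ↔ pvNb grid H W x.1 x.2) (i j : Nat) :
    pvHit H W (F.flatMap (fun p => pvDeltas.map (fun d => (p.1 + d.1, p.2 + d.2)))) i j ↔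
      ((i : Int) < H ∧ (j : Int) < W ∧
        (pvNb grid H W ((i : Int) - 1) j ∨ pvNb grid H W ((i : Int) + 1) j ∨
         pvNb grid H W i ((j : Int) - 1) ∨ pvNb grid H W i ((j : Int) + 1))) := by
  simp only [pvHit, List.mem_flatMap, List.mem_map, pvDeltas, List.mem_cons,
    List.not_mem_nil, or_false]
  constructor
  · rintro ⟨q, ⟨p, hp, d, hd, rfl⟩, hinb, hq⟩
    rw [hF] at hp
    have h1 : p.1 + d.1 = (i : Int) := congrArg Prod.fst hq
    have h2 : p.2 + d.2 = (j : Int) := congrArg Prod.snd hq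
    obtain ⟨hinb1, hinb2, hinb3, hinb4⟩ := hinb
    refine ⟨by simpa [h1] using hinb2, by simpa [h2] using hinb4, ?_⟩
    rcases hd with rfl | rfl | rfl | rfl
    · have e1 : p.1 = (i : Int) + 1 := by simp at h1; omega
      have e2 : p.2 = (j : Int) := by simpa using h2
      rw [e1, e2] at hp
      exact Or.inr (Or.inl hp)
    · have e1 : p.1 = (i : Int) - 1 := by simp at h1; omega
      have e2 : p.2 = (j : Int) := by simpa using h2
      rw [e1, e2] at hp
      exact Or.inl hp
    · have e1 : p.1 = (i : Int) := by simpa using h1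
      have e2 : p.2 = (j : Int) + 1 := by simp at h2; omega
      rw [e1, e2] at hp
      exact Or.inr (Or.inr (Or.inr hp))
    · have e1 : p.1 = (i : Int) := by simpa using h1
      have e2 : p.2 = (j : Int) - 1 := by simp at h2; omega
      rw [e1, e2] at hp
      exact Or.inr (Or.inr (Or.inl hp))
  · rintro ⟨hiH, hjW, h | h | h | h⟩
    · exact ⟨((i : Int), (j : Int)),
        ⟨((i : Int) - 1, (j : Int)), (hF _).mpr h, (1, 0), by simp,
          by rw [Prod.mk.injEq]; exact ⟨by ring, by ring⟩⟩,
        ⟨Int.natCast_nonneg i, hiH, Int.natCast_nonneg j, hjW⟩, rfl⟩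
    · exact ⟨((i : Int), (j : Int)),
        ⟨((i : Int) + 1, (j : Int)), (hF _).mpr h, (-1, 0), by simp,
          by rw [Prod.mk.injEq]; exact ⟨by ring, by ring⟩⟩,
        ⟨Int.natCast_nonneg i, hiH, Int.natCast_nonneg j, hjW⟩, rfl⟩
    · exact ⟨((i : Int), (j : Int)),
        ⟨((i : Int), (j : Int) - 1), (hF _).mpr h, (0, 1), by simp,
          by rw [Prod.mk.injEq]; exact ⟨by ring, by ring⟩⟩,
        ⟨Int.natCast_nonneg i, hiH, Int.natCast_nonneg j, hjW⟩, rfl⟩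
    · exact ⟨((i : Int), (j : Int)),
        ⟨((i : Int), (j : Int) + 1), (hF _).mpr h, (0, -1), by simp,
          by rw [Prod.mk.injEq]; exact ⟨by ring, by ring⟩⟩,
        ⟨Int.natCast_nonneg i, hiH, Int.natCast_nonneg j, hjW⟩, rfl⟩

theorem transform_eq_fold (grid : List (List Int)) :
    transform grid = ((((PySem.List.pyRange 0 (grid.length : Int) 1).foldl (fun acc r =>
      (PySem.List.pyRange 0 ((grid.headD []).length : Int) 1).foldl (fun acc c =>
        if PySem.List.pyGetD (PySem.List.pyGetD grid r []) c 0 = 4 then acc ++ [(r, c)]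
        else acc) acc) []).flatMap (fun p => pvDeltas.map (fun d => (p.1 + d.1, p.2 + d.2)))).foldl
          (pvStep (grid.length : Int) ((grid.headD []).length : Int)) grid) := by
  rw [pv_foldl_flatMap]
  rfl

-- B-side: characterize transform_alt's nested fold per cell
def pvStepB (grid : List (List Int)) (H W : Int) (R : List (List Int)) (q : Int × Int) :
    List (List Int) :=
  if PySem.List.pyGetD (PySem.List.pyGetD R q.1 []) q.2 0 = 5 ∧
      altHas4 grid H W q.1 q.2 = true then
    PySem.List.pySetD R q.1 (PySem.List.pySetD (PySem.List.pyGetD R q.1 []) q.2 2)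
  else R

theorem pvStepB_len (grid : List (List Int)) (H W : Int) (R : List (List Int)) (q : Int × Int)
    (hq1 : 0 ≤ q.1) (hq2 : 0 ≤ q.2) :
    (pvStepB grid H W R q).length = R.length := by
  unfold pvStepB
  split_ifs with h1
  · simp [PySem.List.pySetD_of_nonneg (h := hq1)]
  · rfl

theorem pvStepB_rowlen (grid : List (List Int)) (H W : Int) (R : List (List Int))
    (q : Int × Int) (hq1 : 0 ≤ q.1) (hq2 : 0 ≤ q.2) (i : Nat) :
    ((pvStepB grid H W R q).getD i []).length = (R.getD i []).length := by
  unfold pvStepB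
  split_ifs with h1
  · rw [PySem.List.pySetD_of_nonneg (h := hq1), pv_pyGetD_nonneg _ _ _ hq1,
        PySem.List.pySetD_of_nonneg (h := hq2), pv_getD_set]
    split_ifs with h3
    · rw [h3.1]
      simp
    · rfl
  · rfl

theorem pvStepB_G (grid : List (List Int)) (H W : Int) (R : List (List Int)) (q : Int × Int)
    (hq1 : 0 ≤ q.1) (hq2 : 0 ≤ q.2) (i j : Nat) :
    pvG (pvStepB grid H W R q) i j =
      if pvG R i j = 5 ∧ altHas4 grid H W (i : Int) (j : Int) = true ∧
          q = ((i : Int), (j : Int)) then 2 else pvG R i j := by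
  unfold pvStepB pvG
  split_ifs with h1 h2 h3
  · -- set happened, condition true: q = (i,j)
    obtain ⟨h5R, _, h52⟩ := h2
    rw [PySem.List.pySetD_of_nonneg (h := hq1), pv_pyGetD_nonneg _ _ _ hq1,
        PySem.List.pySetD_of_nonneg (h := hq2), pv_getD_set]
    have h2' := h1.1
    rw [pv_pyGetD_nonneg _ _ _ hq1, pv_pyGetD_nonneg _ _ _ hq2] at h2'
    have hq1n : q.1.toNat = i := by have := congrArg Prod.fst h52; simp at this; omega
    have hq2n : q.2.toNat = j := by have := congrArg Prod.snd h52; simp at this; omega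
    have hlt1 : q.1.toNat < R.length := by
      by_contra hc
      rw [show R.getD q.1.toNat [] = [] from List.getD_eq_default _ _ (by omega)] at h2'
      simp at h2'
    have hlt2 : q.2.toNat < (R.getD q.1.toNat []).length := by
      by_contra hc
      rw [List.getD_eq_default _ _ (by omega)] at h2'
      exact absurd h2' (by norm_num)
    rw [if_pos ⟨hq1n.symm, hlt1⟩, pv_getD_set, if_pos ⟨hq2n.symm, hlt2⟩]
  · -- set happened, condition false: q ≠ (i,j) or R cell ≠ 5
    rw [PySem.List.pySetD_of_nonneg (h := hq1), pv_pyGetD_nonneg _ _ _ hq1,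
        PySem.List.pySetD_of_nonneg (h := hq2), pv_getD_set]
    have h2' := h1.1
    rw [pv_pyGetD_nonneg _ _ _ hq1, pv_pyGetD_nonneg _ _ _ hq2] at h2'
    split_ifs with h5
    · rw [pv_getD_set]
      split_ifs with h6
      · exfalso
        apply h2
        have hqeq : q = ((i : Int), (j : Int)) := by ext <;> simp <;> omega
        refine ⟨?_, ?_, hqeq⟩
        · rw [← h5.1, ← h6.1] at h2'; exact h2'
        · have := h1.2; rwa [hqeq] at this
      · rw [h5.1]
    · rfl
  · -- no set but condition claims q = (i,j), R cell = 5, altHas4: contradiction with h1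
    exfalso
    obtain ⟨h5R, h4, hq⟩ := h3
    apply h1
    rw [hq]
    refine ⟨?_, h4⟩
    rw [pv_pyGetD_nonneg _ _ _ (Int.natCast_nonneg i), Int.toNat_natCast,
        pv_pyGetD_nonneg _ _ _ (Int.natCast_nonneg j), Int.toNat_natCast]
    exact h5R
  · rfl

abbrev pvHitB (grid : List (List Int)) (H W : Int) (Q : List (Int × Int)) (i j : Nat) : Prop :=
  ((i : Int), (j : Int)) ∈ Q ∧ altHas4 grid H W (i : Int) (j : Int) = true

theorem pvFoldB_inv (grid : List (List Int)) (H W : Int) (L : List (Int × Int)) :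
    ∀ (Q : List (Int × Int)) (R : List (List Int)),
      (∀ q ∈ L, 0 ≤ q.1 ∧ 0 ≤ q.2) →
      R.length = grid.length →
      (∀ i, (R.getD i []).length = (grid.getD i []).length) →
      (∀ i j, pvG R i j = if pvG grid i j = 5 ∧ pvHitB grid H W Q i j then 2 else pvG grid i j) →
      (L.foldl (pvStepB grid H W) R).length = grid.length ∧
      (∀ i, ((L.foldl (pvStepB grid H W) R).getD i []).length = (grid.getD i []).length) ∧
      (∀ i j, pvG (L.foldl (pvStepB grid H W) R) i j =
        if pvG grid i j = 5 ∧ pvHitB grid H W (Q ++ L) i j then 2 else pvG grid i j) := by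
  induction L with
  | nil =>
    intro Q R _ h1 h2 h3
    simp only [List.foldl_nil, List.append_nil]
    exact ⟨h1, h2, h3⟩
  | cons q L ih =>
    intro Q R hL h1 h2 h3
    have hq1 : 0 ≤ q.1 := (hL q (List.mem_cons_self)).1
    have hq2 : 0 ≤ q.2 := (hL q (List.mem_cons_self)).2
    have hstep : ∀ i j, pvG (pvStepB grid H W R q) i j =
        if pvG grid i j = 5 ∧ pvHitB grid H W (Q ++ [q]) i j then 2 else pvG grid i j := by
      intro i j
      have hqiff : pvHitB grid H W (Q ++ [q]) i j ↔
          pvHitB grid H W Q i j ∨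
            (q = ((i : Int), (j : Int)) ∧ altHas4 grid H W (i : Int) (j : Int) = true) := by
        unfold pvHitB
        rw [List.mem_append, List.mem_singleton]
        constructor
        · rintro ⟨hm | hm, h4⟩
          · exact Or.inl ⟨hm, h4⟩
          · exact Or.inr ⟨hm.symm, h4⟩
        · rintro (⟨hm, h4⟩ | ⟨hm, h4⟩)
          · exact ⟨Or.inl hm, h4⟩
          · exact ⟨Or.inr hm.symm, h4⟩
      rw [pvStepB_G grid H W R q hq1 hq2, h3 i j]
      simp only [hqiff]
      by_cases hA : pvG grid i j = 5 <;> by_cases hB : pvHitB grid H W Q i j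
      · have hin : (if pvG grid i j = 5 ∧ pvHitB grid H W Q i j then (2:Int)
            else pvG grid i j) = 2 := if_pos ⟨hA, hB⟩
        rw [hin]
        have hno : ¬((2:Int) = 5 ∧ altHas4 grid H W (i : Int) (j : Int) = true ∧
            q = ((i : Int), (j : Int))) := by rintro ⟨h, -⟩; norm_num at h
        rw [if_neg hno, if_pos ⟨hA, Or.inl hB⟩]
      · have hin : (if pvG grid i j = 5 ∧ pvHitB grid H W Q i j then (2:Int)
            else pvG grid i j) = pvG grid i j := if_neg (fun h => hB h.2)
        rw [hin]
        by_cases hC : altHas4 grid H W (i : Int) (j : Int) = true ∧ q = ((i : Int), (j : Int))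
        · rw [if_pos ⟨hA, hC.1, hC.2⟩, if_pos ⟨hA, Or.inr ⟨hC.2, hC.1⟩⟩]
        · rw [if_neg (fun h => hC ⟨h.2.1, h.2.2⟩),
              if_neg (fun h => h.2.elim hB (fun h' => hC ⟨h'.2, h'.1⟩))]
      · have hin : (if pvG grid i j = 5 ∧ pvHitB grid H W Q i j then (2:Int)
            else pvG grid i j) = pvG grid i j := if_neg (fun h => hA h.1)
        rw [hin, if_neg (fun h => hA h.1), if_neg (fun h => hA h.1)]
      · have hin : (if pvG grid i j = 5 ∧ pvHitB grid H W Q i j then (2:Int)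
            else pvG grid i j) = pvG grid i j := if_neg (fun h => hA h.1)
        rw [hin, if_neg (fun h => hA h.1), if_neg (fun h => hA h.1)]
    have := ih (Q ++ [q]) (pvStepB grid H W R q) (fun p hp => hL p (List.mem_cons_of_mem _ hp))
      (by rw [pvStepB_len grid H W R q hq1 hq2]; exact h1)
      (fun i => by rw [pvStepB_rowlen grid H W R q hq1 hq2]; exact h2 i) hstep
    simpa using this

def pvPairs (H W : Int) : List (Int × Int) :=
  (PySem.List.pyRange 0 H 1).flatMap (fun r => (PySem.List.pyRange 0 W 1).map (fun c => (r, c)))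

theorem pv_mem_pairs (H W : Int) (x : Int × Int) :
    x ∈ pvPairs H W ↔ (0 ≤ x.1 ∧ x.1 < H ∧ 0 ≤ x.2 ∧ x.2 < W) := by
  simp only [pvPairs, List.mem_flatMap, List.mem_map, PySem.List.mem_pyRange_one]
  constructor
  · rintro ⟨r, hr, c, hc, rfl⟩
    exact ⟨hr.1, hr.2, hc.1, hc.2⟩
  · rintro ⟨h1, h2, h3, h4⟩
    exact ⟨x.1, ⟨h1, h2⟩, x.2, ⟨h3, h4⟩, rfl⟩

theorem transform_alt_eq_fold (grid : List (List Int)) :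
    transform_alt grid = (pvPairs (grid.length : Int) ((grid.headD []).length : Int)).foldl
      (pvStepB grid (grid.length : Int) ((grid.headD []).length : Int)) grid := by
  unfold pvPairs
  rw [pv_foldl_flatMap]
  simp only [List.foldl_map]
  rfl

-- ===== VERDICT (by name: the statement is the Claim_ definition above) =====
theorem transform_spec : Claim_equal_transform := by
  intro grid _hdom hpre
  unfold Spec_transform
  set H := (grid.length : Int) with hH
  set W := ((grid.headD []).length : Int) with hW
  set F := ((PySem.List.pyRange 0 H 1).foldl (fun acc r =>
      (PySem.List.pyRange 0 W 1).foldl (fun acc c =>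
        if PySem.List.pyGetD (PySem.List.pyGetD grid r []) c 0 = 4 then acc ++ [(r, c)]
        else acc) acc) []) with hF
  obtain ⟨hlenA, hrlenA, hcellA⟩ := pvFold_inv grid H W
    (F.flatMap (fun p => pvDeltas.map (fun d => (p.1 + d.1, p.2 + d.2))))
    [] grid rfl (fun _ => rfl) (fun i j => by simp)
  obtain ⟨hlenB, hrlenB, hcellB⟩ := pvFoldB_inv grid H W (pvPairs H W)
    [] grid (fun q hq => by
      have := (pv_mem_pairs H W q).1 hq
      exact ⟨this.1, this.2.2.1⟩)
    rfl (fun _ => rfl) (fun i j => by simp [pvHitB])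
  rw [List.nil_append] at hcellA hcellB
  rw [transform_eq_fold, transform_alt_eq_fold]
  set TA := (F.flatMap (fun p => pvDeltas.map (fun d => (p.1 + d.1, p.2 + d.2)))).foldl
      (pvStep H W) grid with hTA
  set TB := (pvPairs H W).foldl (pvStepB grid H W) grid with hTB
  apply List.ext_getElem (by rw [hlenA, hlenB])
  intro i h1 h2
  have hig : i < grid.length := by rwa [hlenA] at h1
  have hrlA : (TA[i]'h1).length = grid[i].length := by
    have := hrlenA i
    rwa [List.getD_eq_getElem _ _ h1, List.getD_eq_getElem _ _ hig] at this
  have hrlB : (TB[i]'h2).length = grid[i].length := by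
    have := hrlenB i
    rwa [List.getD_eq_getElem _ _ h2, List.getD_eq_getElem _ _ hig] at this
  apply List.ext_getElem (by rw [hrlA, hrlB])
  intro j hj1 hj2
  have hjg : j < grid[i].length := by rwa [hrlA] at hj1
  have hAv : (TA[i]'h1)[j]'hj1 = pvG TA i j := by
    unfold pvG
    rw [List.getD_eq_getElem _ _ h1, List.getD_eq_getElem _ _ hj1]
  have hBv : (TB[i]'h2)[j]'hj2 = pvG TB i j := by
    unfold pvG
    rw [List.getD_eq_getElem _ _ h2, List.getD_eq_getElem _ _ hj2]
  rw [hAv, hBv, hcellA i j, hcellB i j]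
  have hcond : pvHit H W (F.flatMap (fun p => pvDeltas.map (fun d => (p.1 + d.1, p.2 + d.2)))) i j ↔
      pvHitB grid H W (pvPairs H W) i j := by
    rw [pv_hit_iff grid H W F (fun x => by rw [hF]; exact pv_mem_fours grid H W x) i j]
    unfold pvHitB
    rw [pv_mem_pairs, pv_altHas4_iff]
    constructor
    · rintro ⟨hiH, hjW, h4⟩
      exact ⟨⟨Int.natCast_nonneg i, hiH, Int.natCast_nonneg j, hjW⟩, h4⟩
    · rintro ⟨⟨_, hiH, _, hjW⟩, h4⟩
      exact ⟨hiH, hjW, h4⟩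
  rw [if_congr (and_congr_right fun _ => hcond) rfl rfl]
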